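-- pv_equiv track=rewrite | github.com/seongjin0614/coding-test | Programmers/LV1/부족한금액계산하기.py | solution
-- ===== SOURCE A (Python) =====
-- def solution(price, money, count):
--     answer = money
--     for i in range(1, count +1):
--         answer -= price*i
--
--     if answer >= 0:
--         answer = 0
--     else:
--         answer = -(answer)
--     return answer
-- ===== SOURCE B (Python) =====
-- def solution(price, money, count):
--     # closed-form arithmetic series instead of the O(count) loop
--     return max(0, price * count * (count + 1) // 2 - money)
-- ===== Notes on version B (the rewrite author's own statement) =====
-- stated objective: faster
-- what changed: Replaces the O(count) subtraction loop with the arithmetic-series closed form price*count*(count+1)//2 and a single max; Pre_ excludes count <= -2, outside the natural domain, where A's empty loop and the closed form disagree.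
-- outside the precondition, e.g. on solution(3, -5, -2): A returns 5, B returns 8
import Mathlib
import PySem

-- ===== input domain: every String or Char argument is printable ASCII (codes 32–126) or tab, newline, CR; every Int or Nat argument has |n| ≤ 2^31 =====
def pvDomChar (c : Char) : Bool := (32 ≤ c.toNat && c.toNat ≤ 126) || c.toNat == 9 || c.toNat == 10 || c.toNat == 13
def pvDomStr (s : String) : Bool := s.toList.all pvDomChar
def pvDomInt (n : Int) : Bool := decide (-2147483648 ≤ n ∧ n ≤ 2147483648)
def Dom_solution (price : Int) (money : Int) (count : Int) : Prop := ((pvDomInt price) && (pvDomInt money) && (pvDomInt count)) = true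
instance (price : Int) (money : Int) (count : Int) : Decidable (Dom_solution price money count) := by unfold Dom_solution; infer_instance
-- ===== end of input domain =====

-- B replaces A's O(count) subtraction loop with the closed-form arithmetic series price*count*(count+1)//2 (faster, asymptotic).


-- ===== PORT A =====
def solution (price : Int) (money : Int) (count : Int) : Int :=
  let answer := (PySem.List.pyRange 1 (count + 1) 1).foldl (fun answer i => answer - price * i) money
  if answer ≥ 0 then 0 else -answer

-- ===== PORT B =====
def solution_alt (price : Int) (money : Int) (count : Int) : Int :=
  max 0 (PySem.Int.floordiv (price * count * (count + 1)) 2 - money)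

-- ===== PRECONDITION & SPEC =====
-- Pre_ restricts to the task's natural domain (count is a number of purchases): for count ≤ -2
-- A's empty loop and B's closed form disagree; such counts are outside the problem's domain.
-- (count = -1 is kept: both the empty loop and the closed form give the same value there.)
def Pre_solution (price : Int) (money : Int) (count : Int) : Prop := -1 ≤ count
instance (price : Int) (money : Int) (count : Int) : Decidable (Pre_solution price money count) := by unfold Pre_solution; infer_instance
def pvWitness_solution : Int × Int × Int := (3, 20, 4)

def Spec_solution (price : Int) (money : Int) (count : Int) (out : Int) : Prop := out = solution_alt price money count
instance (price : Int) (money : Int) (count : Int) (out : Int) : Decidable (Spec_solution price money count out) := by unfold Spec_solution; infer_instance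

-- ===== CLAIM (what is proved, stated in full; the proofs are below) =====
def Claim_equal_solution : Prop := ∀ (price : Int) (money : Int) (count : Int), Dom_solution price money count → Pre_solution price money count → Spec_solution price money count (solution price money count)

-- ===== LEMMAS AND PROOFS =====

-- Gauss sum 1 + 2 + … + n as an integer
def gauss (n : Nat) : Int := ((n * (n + 1)) / 2 : Nat)

theorem two_mul_gauss (n : Nat) : 2 * gauss n = (n : Int) * ((n : Int) + 1) := by
  obtain ⟨k, hk⟩ := Nat.even_mul_succ_self n
  have hk2 : n * (n + 1) = 2 * k := by omega
  unfold gauss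
  rw [hk2, Nat.mul_div_cancel_left k (by norm_num)]
  have hcast : ((n * (n + 1) : Nat) : Int) = (n : Int) * ((n : Int) + 1) := by push_cast; ring
  rw [← hcast, hk2]
  push_cast
  ring

theorem foldl_gauss (price money : Int) (n : Nat) :
    (PySem.List.pyRange 1 ((n : Int) + 1) 1).foldl (fun answer i => answer - price * i) money
      = money - price * gauss n := by
  induction n with
  | zero => simp [PySem.List.pyRange, gauss]
  | succ k ih =>
    have h : PySem.List.pyRange 1 (((k : Int) + 1) + 1) 1
        = PySem.List.pyRange 1 ((k : Int) + 1) 1 ++ [(k : Int) + 1] :=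
      PySem.List.pyRange_one_succ_right (by omega)
    have hg : gauss (k + 1) = gauss k + ((k : Int) + 1) := by
      have h2 := two_mul_gauss k
      have h3 := two_mul_gauss (k + 1)
      push_cast at h3 ⊢
      nlinarith
    have hc : ((k + 1 : Nat) : Int) + 1 = ((k : Int) + 1) + 1 := by push_cast; ring
    rw [hc, h, List.foldl_append, ih]
    simp only [List.foldl]
    push_cast [hg]
    ring

theorem floordiv_closed (price : Int) (n : Nat) :
    PySem.Int.floordiv (price * (n : Int) * ((n : Int) + 1)) 2 = price * gauss n := by
  have h2 := two_mul_gauss n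
  have h : price * (n : Int) * ((n : Int) + 1) = price * gauss n * 2 := by
    rw [mul_assoc, ← h2]; ring
  rw [h, PySem.Int.floordiv_eq_ediv_of_pos (by omega)]
  exact Int.mul_ediv_cancel _ (by omega)

-- ===== VERDICT (by name: the statement is the Claim_ definition above) =====
theorem solution_spec : Claim_equal_solution := by
  intro price money count _ hpre
  by_cases hneg : count = -1
  · subst hneg
    unfold Spec_solution solution solution_alt
    norm_num [PySem.List.pyRange, PySem.Int.floordiv]
    split_ifs <;> omega
  have hpre : 0 ≤ count := by unfold Pre_solution at hpre; omega
  obtain ⟨n, rfl⟩ : ∃ n : Nat, count = (n : Int) := ⟨count.toNat, (Int.toNat_of_nonneg hpre).symm⟩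
  unfold Spec_solution solution solution_alt
  rw [foldl_gauss, floordiv_closed]
  dsimp only
  split_ifs with h <;> omega
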